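-- pv_equiv track=rewrite | github.com/BrunoAlejandroDev/Python | exercicios_logica/ex22.py | automatizar_robo
-- ===== SOURCE A (Python) =====
-- def automatizar_robo(lista_posicoes):
--     posicao_robo = 0
--
--     #* Iterar a lista de posicoes
--     for posicao in lista_posicoes:
--         posicao_normalizada = posicao.lower()
--         if posicao_normalizada == 'direita':
--             posicao_robo += 1
--         elif posicao_normalizada == 'esquerda':
--             posicao_robo -= 1
--     return posicao_robo
-- ===== SOURCE B (Python) =====
-- def automatizar_robo(lista_posicoes):
--     def passo(p):
--         k = p.lower()
--         if k == 'direita':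
--             return 1
--         if k == 'esquerda':
--             return -1
--         return 0
--
--     def go(xs):
--         if len(xs) == 0:
--             return 0
--         if len(xs) == 1:
--             return passo(xs[0])
--         mid = len(xs) // 2
--         return go(xs[:mid]) + go(xs[mid:])
--
--     return go(lista_posicoes)
-- ===== Notes on version B (the rewrite author's own statement) =====
-- stated objective: alternative
-- what changed: Replaces A's single left-to-right accumulating loop with a divide-and-conquer recursion: split the list in half, score each half recursively, and add the two partial displacements (correct because displacement is additive over concatenation).
import Mathlib
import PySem

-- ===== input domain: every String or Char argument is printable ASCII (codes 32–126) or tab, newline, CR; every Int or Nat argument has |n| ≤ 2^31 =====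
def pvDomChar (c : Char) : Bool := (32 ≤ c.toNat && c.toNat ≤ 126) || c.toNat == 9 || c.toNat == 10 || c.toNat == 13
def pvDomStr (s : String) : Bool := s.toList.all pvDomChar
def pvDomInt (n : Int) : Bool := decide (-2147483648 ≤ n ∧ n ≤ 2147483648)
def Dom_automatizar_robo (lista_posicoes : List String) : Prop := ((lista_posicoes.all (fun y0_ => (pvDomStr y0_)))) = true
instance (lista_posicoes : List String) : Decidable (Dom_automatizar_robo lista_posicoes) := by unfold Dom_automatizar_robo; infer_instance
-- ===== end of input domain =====

-- B replaces A's single accumulating branch loop by a divide-and-conquer recursion (split in half, score halves, add); alternative decomposition, same cost.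

-- ===== PORT A =====
def automatizar_robo (lista_posicoes : List String) : Int :=
  lista_posicoes.foldl
    (fun posicao_robo posicao =>
      let posicao_normalizada := PySem.Str.lower posicao
      if posicao_normalizada == "direita" then posicao_robo + 1
      else if posicao_normalizada == "esquerda" then posicao_robo - 1
      else posicao_robo) 0

-- ===== PORT B =====
-- helper passo(p) of Source B
def roboPasso (p : String) : Int :=
  let k := PySem.Str.lower p
  if k == "direita" then 1
  else if k == "esquerda" then -1
  else 0

-- helper go(xs) of Source B; xs[:mid] / xs[mid:] are take/drop, exact since 0 ≤ mid ≤ len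
def roboGo : List String → Int
  | [] => 0
  | [p] => roboPasso p
  | x :: y :: rest =>
      let xs := x :: y :: rest
      let mid := xs.length / 2
      roboGo (xs.take mid) + roboGo (xs.drop mid)
termination_by xs => xs.length
decreasing_by
  · simp; omega
  · simp; omega

def automatizar_robo_alt (lista_posicoes : List String) : Int :=
  roboGo lista_posicoes

-- ===== PRECONDITION & SPEC =====
def Spec_automatizar_robo (lista_posicoes : List String) (out : Int) : Prop := out = automatizar_robo_alt lista_posicoes
instance (lista_posicoes : List String) (out : Int) : Decidable (Spec_automatizar_robo lista_posicoes out) := by unfold Spec_automatizar_robo; infer_instance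

-- ===== CLAIM (what is proved, stated in full; the proofs are below) =====
def Claim_equal_automatizar_robo : Prop := ∀ (lista_posicoes : List String), Dom_automatizar_robo lista_posicoes → Spec_automatizar_robo lista_posicoes (automatizar_robo lista_posicoes)

-- ===== LEMMAS AND PROOFS =====
lemma roboGo_eq_sum : (xs : List String) → roboGo xs = (xs.map roboPasso).sum
  | [] => by simp [roboGo]
  | [p] => by simp [roboGo]
  | x :: y :: rest => by
      have h1 := roboGo_eq_sum ((x :: y :: rest).take ((x :: y :: rest).length / 2))
      have h2 := roboGo_eq_sum ((x :: y :: rest).drop ((x :: y :: rest).length / 2))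
      rw [roboGo, h1, h2, ← List.sum_append, ← List.map_append, List.take_append_drop]
termination_by xs => xs.length
decreasing_by
  · simp; omega
  · simp; omega

lemma robo_foldl_sum (l : List String) (a : Int) :
    l.foldl
      (fun posicao_robo posicao =>
        let posicao_normalizada := PySem.Str.lower posicao
        if posicao_normalizada == "direita" then posicao_robo + 1
        else if posicao_normalizada == "esquerda" then posicao_robo - 1
        else posicao_robo) a
    = a + (l.map roboPasso).sum := by
  induction l generalizing a with
  | nil => simp
  | cons x xs ih =>
    simp only [List.foldl_cons, List.map_cons, List.sum_cons, ih, roboPasso]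
    by_cases h1 : PySem.Str.lower x = "direita"
    · simp [h1]; ring
    · by_cases h2 : PySem.Str.lower x = "esquerda"
      · simp [h2]; ring
      · simp [h1, h2]

-- ===== VERDICT (by name: the statement is the Claim_ definition above) =====
theorem automatizar_robo_spec : Claim_equal_automatizar_robo := by
  intro l _
  unfold Spec_automatizar_robo automatizar_robo automatizar_robo_alt
  rw [roboGo_eq_sum, robo_foldl_sum]
  ring
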